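-- pv_equiv track=rewrite | github.com/tdslivensky/AlgorithmsAndDataStructures | Algorithms on Strings/Programming-Assignment-3/suffix_array_long.py | ComputeClasses
-- ===== SOURCE A (Python) =====
-- def ComputeClasses(text, order):
--     cl = [0] * len(text)
--     cl[order[0]] = 0
--
--     for i in range(1, len(text)):
--         if text[order[i]] != text[order[i-1]]:
--             cl[order[i]] = cl[order[i-1]] + 1
--         else:
--             cl[order[i]] = cl[order[i-1]]
--
--     return cl
-- ===== SOURCE B (Python) =====
-- def _count_le(xs, x):
--     # number of elements of the sorted list xs that are <= x (binary search)
--     lo, hi = 0, len(xs)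
--     while lo < hi:
--         mid = (lo + hi) // 2
--         if xs[mid] <= x:
--             lo = mid + 1
--         else:
--             hi = mid
--     return lo
--
--
-- def ComputeClasses(text, order):
--     # collect the change points of the character sequence taken in `order`,
--     # then each rank's class is how many change points lie at or before it,
--     # found by binary search over the sorted change-point list
--     n = len(text)
--     boundaries = [i for i in range(1, n) if text[order[i]] != text[order[i - 1]]]
--     cl = [0] * n
--     for i in range(n):
--         cl[order[i]] = _count_le(boundaries, i)
--     return cl
-- ===== Notes on version B (the rewrite author's own statement) =====
-- stated objective: alternative
-- what changed: instead of A's single pass propagating each class from the previous rank through the partially-built result array, B first collects the sorted list of change points and then assigns each rank its class independently by binary-searching how many change points lie at or before it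
import Mathlib
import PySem

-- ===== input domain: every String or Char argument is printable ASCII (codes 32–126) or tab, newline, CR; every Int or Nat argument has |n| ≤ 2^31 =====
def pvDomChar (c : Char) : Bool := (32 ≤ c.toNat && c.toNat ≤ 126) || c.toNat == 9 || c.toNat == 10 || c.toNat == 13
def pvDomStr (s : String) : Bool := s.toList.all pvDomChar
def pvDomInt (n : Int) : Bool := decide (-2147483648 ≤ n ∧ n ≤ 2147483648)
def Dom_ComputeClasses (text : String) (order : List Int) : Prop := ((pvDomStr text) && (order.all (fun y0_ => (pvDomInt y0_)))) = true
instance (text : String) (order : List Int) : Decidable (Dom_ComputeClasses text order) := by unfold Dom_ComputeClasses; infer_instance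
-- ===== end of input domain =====

-- B replaces A's sequential class propagation with a change-point list: it collects
-- the positions where the reordered character sequence changes, then assigns each
-- rank its class independently by binary-searching that sorted list (alternative).

-- ===== PORT A =====
def ComputeClasses (text : String) (order : List Int) : List Int :=
  let t := text.toList
  let cl0 := List.replicate t.length (0 : Int)
  let cl1 := PySem.List.pySetD cl0 (PySem.List.pyGetD order 0 0) 0
  (PySem.List.pyRange 1 t.length).foldl
    (fun cl i =>
      if PySem.List.pyGetD t (PySem.List.pyGetD order i 0) ' '
           ≠ PySem.List.pyGetD t (PySem.List.pyGetD order (i - 1) 0) ' ' then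
        PySem.List.pySetD cl (PySem.List.pyGetD order i 0)
          (PySem.List.pyGetD cl (PySem.List.pyGetD order (i - 1) 0) 0 + 1)
      else
        PySem.List.pySetD cl (PySem.List.pyGetD order i 0)
          (PySem.List.pyGetD cl (PySem.List.pyGetD order (i - 1) 0) 0))
    cl1

-- ===== PORT B =====
-- _count_le: hand-written binary search (while lo < hi), ported step for step
def pvCountLoop (xs : List Int) (x : Int) (lo hi : Nat) : Nat :=
  if lo < hi then
    if PySem.List.pyGetD xs (((lo + hi) / 2 : Nat) : Int) 0 ≤ x then
      pvCountLoop xs x ((lo + hi) / 2 + 1) hi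
    else
      pvCountLoop xs x lo ((lo + hi) / 2)
  else lo
termination_by hi - lo
decreasing_by all_goals omega

def pvCountLE (xs : List Int) (x : Int) : Nat := pvCountLoop xs x 0 xs.length

def ComputeClasses_alt (text : String) (order : List Int) : List Int :=
  let t := text.toList
  let boundaries := (PySem.List.pyRange 1 t.length).filter
      (fun i => decide (PySem.List.pyGetD t (PySem.List.pyGetD order i 0) ' '
                 ≠ PySem.List.pyGetD t (PySem.List.pyGetD order (i - 1) 0) ' '))
  (PySem.List.pyRange 0 t.length).foldl
      (fun cl i => PySem.List.pySetD cl (PySem.List.pyGetD order i 0)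
        ((pvCountLE boundaries i : Nat) : Int))
      (List.replicate t.length (0 : Int))

-- ===== PRECONDITION & SPEC =====
-- Pre_ excludes exactly the inputs on which the Python A raises IndexError:
-- empty text, order shorter than text, or an out-of-range index among the used entries.
def Pre_ComputeClasses (text : String) (order : List Int) : Prop :=
  0 < text.toList.length ∧ text.toList.length ≤ order.length ∧
    ∀ i ∈ order.take text.toList.length, PySem.Raise.InRange text.toList.length i
instance (text : String) (order : List Int) : Decidable (Pre_ComputeClasses text order) := by
  unfold Pre_ComputeClasses PySem.Raise.InRange; infer_instance
def pvWitness_ComputeClasses : String × List Int := ("ab", [1, 0])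
def Spec_ComputeClasses (text : String) (order : List Int) (out : List Int) : Prop := out = ComputeClasses_alt text order
instance (text : String) (order : List Int) (out : List Int) : Decidable (Spec_ComputeClasses text order out) := by unfold Spec_ComputeClasses; infer_instance

-- ===== CLAIM (what is proved, stated in full; the proofs are below) =====
def Claim_equal_ComputeClasses : Prop := ∀ (text : String) (order : List Int), Dom_ComputeClasses text order → Pre_ComputeClasses text order → Spec_ComputeClasses text order (ComputeClasses text order)

-- ===== LEMMAS AND PROOFS =====

-- proof-side vocabulary: the index, character and class value at sorted position i
def pvO (order : List Int) (i : Nat) : Int := order.getD i 0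
def pvCh (t : List Char) (order : List Int) (i : Nat) : Char :=
  PySem.List.pyGetD t (pvO order i) ' '
def pvCls (t : List Char) (order : List Int) : Nat → Int
  | 0 => 0
  | k+1 => if pvCh t order (k+1) ≠ pvCh t order k then pvCls t order k + 1 else pvCls t order k
-- the scatter of class values 0..k-1 into a zero array
def pvScat (t : List Char) (order : List Int) (k : Nat) : List Int :=
  (List.range k).foldl
    (fun cl i => PySem.List.pySetD cl (pvO order i) (pvCls t order i))
    (List.replicate t.length (0 : Int))
-- the port's change-point predicate, and the class value as a change-point count
def pvPred (t : List Char) (order : List Int) (b : Int) : Bool :=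
  decide (PySem.List.pyGetD t (PySem.List.pyGetD order b 0) ' '
            ≠ PySem.List.pyGetD t (PySem.List.pyGetD order (b - 1) 0) ' ')
def pvClsP (p : Int → Bool) : Nat → Int
  | 0 => 0
  | k+1 => pvClsP p k + (if p ((k+1 : Nat) : Int) then 1 else 0)

theorem pv_getD_setD_self {α : Type} (xs : List α) (i : Int) (v d : α)
    (h : PySem.Raise.InRange xs.length i) :
    PySem.List.pyGetD (PySem.List.pySetD xs i v) i d = v := by
  obtain ⟨hl, hr⟩ := h
  unfold PySem.List.pyGetD PySem.List.pyGet? PySem.List.pySetD PySem.List.pySet? PySem.List.pyIdx?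
  by_cases h0 : 0 ≤ i
  · have hi : i.toNat < xs.length := by omega
    simp [h0, hr, hi]
  · have h1 : -(xs.length : Int) ≤ i := hl
    have hk : xs.length - (-i).toNat < xs.length := by omega
    simp [h0, h1, hk]

theorem pv_scat_length (t : List Char) (order : List Int) (k : Nat) :
    (pvScat t order k).length = t.length := by
  have h : ∀ (l : List Nat) (init : List Int),
      (l.foldl (fun cl i => PySem.List.pySetD cl (pvO order i) (pvCls t order i)) init).length
        = init.length := by
    intro l
    induction l with
    | nil => intro init; rfl
    | cons a l ih => intro init; simp [List.foldl_cons, ih, PySem.List.length_pySetD]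
  simpa [pvScat] using h (List.range k) (List.replicate t.length 0)

theorem pv_scat_succ (t : List Char) (order : List Int) (k : Nat) :
    pvScat t order (k+1)
      = PySem.List.pySetD (pvScat t order k) (pvO order k) (pvCls t order k) := by
  simp [pvScat, List.range_succ]

theorem pv_scat_read (t : List Char) (order : List Int) (k : Nat)
    (h : PySem.Raise.InRange t.length (pvO order k)) :
    PySem.List.pyGetD (pvScat t order (k+1)) (pvO order k) 0 = pvCls t order k := by
  rw [pv_scat_succ]
  exact pv_getD_setD_self _ _ _ _ (by rw [pv_scat_length]; exact h)

-- the sorted change-point list splits its indices at the count of elements ≤ x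
theorem pv_sorted_threshold (xs : List Int) (hs : xs.Pairwise (· ≤ ·)) (x : Int) :
    (∀ j < xs.countP (fun b => decide (b ≤ x)), xs.getD j 0 ≤ x) ∧
    (∀ j, xs.countP (fun b => decide (b ≤ x)) ≤ j → j < xs.length → x < xs.getD j 0) := by
  induction xs with
  | nil => exact ⟨by intro j hj; simp at hj, by intro j _ hj; simp at hj⟩
  | cons a xs ih =>
    have ha : ∀ b ∈ xs, a ≤ b := fun b hb => List.rel_of_pairwise_cons hs hb
    obtain ⟨ih1, ih2⟩ := ih (List.pairwise_cons.mp hs).2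
    by_cases hax : a ≤ x
    · have hc : (a :: xs).countP (fun b => decide (b ≤ x))
          = xs.countP (fun b => decide (b ≤ x)) + 1 := by
        simp [hax]
      constructor
      · intro j hj
        cases j with
        | zero => simpa using hax
        | succ k =>
          have : k < xs.countP (fun b => decide (b ≤ x)) := by omega
          simpa using ih1 k this
      · intro j hj hjl
        cases j with
        | zero => omega
        | succ k =>
          have h1 : xs.countP (fun b => decide (b ≤ x)) ≤ k := by omega
          have h2 : k < xs.length := by simpa using hjl
          simpa using ih2 k h1 h2
    · have hzero : xs.countP (fun b => decide (b ≤ x)) = 0 := by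
        rw [List.countP_eq_zero]
        intro b hb
        have := ha b hb
        simp only [decide_eq_true_eq]
        omega
      have hc : (a :: xs).countP (fun b => decide (b ≤ x)) = 0 := by
        simp [hax, hzero]
      constructor
      · intro j hj; omega
      · intro j _ hjl
        cases j with
        | zero => simpa using (by omega : x < a)
        | succ k =>
          have hk : k < xs.length := by simpa using hjl
          have hmem : xs.getD k 0 ∈ xs := by
            rw [List.getD_eq_getElem xs 0 hk]; exact List.getElem_mem hk
          have := ha _ hmem
          have hxa : x < a := by omega
          simpa using (by omega : x < xs.getD k 0)

-- the binary-search loop converges to the threshold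
theorem pv_countLoop_eq (xs : List Int) (x : Int) (tt : Nat)
    (hb : ∀ j < tt, xs.getD j 0 ≤ x)
    (hc : ∀ j, tt ≤ j → j < xs.length → x < xs.getD j 0) :
    ∀ (d lo hi : Nat), hi - lo ≤ d → lo ≤ tt → tt ≤ hi → hi ≤ xs.length →
      pvCountLoop xs x lo hi = tt := by
  intro d
  induction d with
  | zero =>
    intro lo hi hd h1 h2 _
    rw [pvCountLoop]
    have : ¬ lo < hi := by omega
    simp [this]; omega
  | succ d ih =>
    intro lo hi hd h1 h2 h3
    rw [pvCountLoop]
    by_cases hlh : lo < hi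
    · simp only [hlh, if_true]
      have hmid1 : lo ≤ (lo + hi) / 2 := by omega
      have hmid2 : (lo + hi) / 2 < hi := by omega
      rw [PySem.List.pyGetD_natCast]
      by_cases hle : xs.getD ((lo + hi) / 2) 0 ≤ x
      · simp only [hle, if_true]
        have hmt : (lo + hi) / 2 < tt := by
          by_contra hcon
          have := hc ((lo + hi) / 2) (by omega) (by omega)
          omega
        exact ih ((lo + hi) / 2 + 1) hi (by omega) (by omega) h2 h3
      · simp only [hle, if_false]
        have hmt : tt ≤ (lo + hi) / 2 := by
          by_contra hcon
          exact hle (hb _ (by omega))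
        exact ih lo ((lo + hi) / 2) (by omega) h1 hmt (by omega)
    · simp [hlh]; omega

theorem pv_countLE_eq (xs : List Int) (x : Int) (hs : xs.Pairwise (· ≤ ·)) :
    pvCountLE xs x = xs.countP (fun b => decide (b ≤ x)) := by
  obtain ⟨hb, hc⟩ := pv_sorted_threshold xs hs x
  have hlen : xs.countP (fun b => decide (b ≤ x)) ≤ xs.length := List.countP_le_length
  exact pv_countLoop_eq xs x _ hb hc xs.length 0 xs.length (by omega) (by omega) hlen le_rfl

theorem pv_bnd_pairwise (p : Int → Bool) (n : Int) :
    ((PySem.List.pyRange 1 n 1).filter p).Pairwise (· ≤ ·) :=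
  ((PySem.List.pairwise_lt_pyRange_one 1 n).filter p).imp (fun h => le_of_lt h)

-- the prefix of the change-point list below i+1 has length pvClsP i
theorem pv_len_bnd (p : Int → Bool) (i : Nat) :
    ((((PySem.List.pyRange 1 ((i+1 : Nat) : Int) 1).filter p).length : Int)) = pvClsP p i := by
  induction i with
  | zero =>
    have : PySem.List.pyRange 1 ((1 : Nat) : Int) 1 = [] :=
      PySem.List.pyRange_one_eq_nil (by norm_num)
    simp [pvClsP]
  | succ k ih =>
    have hcast : ((k + 1 + 1 : Nat) : Int) = ((k + 1 : Nat) : Int) + 1 := by push_cast; ring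
    rw [hcast, PySem.List.pyRange_one_succ_right (by push_cast; omega), List.filter_append]
    simp only [List.length_append]
    rw [show pvClsP p (k+1) = pvClsP p k + (if p ((k+1 : Nat) : Int) then 1 else 0) from rfl,
      ← ih]
    by_cases hp : p ((k : Int) + 1)
    · simp [hp]
    · simp [hp]

-- counting elements ≤ i in the full change-point list = the prefix length, for i < n
theorem pv_count_full (p : Int → Bool) (n i : Nat) (hi : i < n) :
    ((PySem.List.pyRange 1 (n : Int) 1).filter p).countP (fun b => decide (b ≤ (i : Int)))
      = ((PySem.List.pyRange 1 ((i+1 : Nat) : Int) 1).filter p).length := by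
  rw [PySem.List.pyRange_one_append 1 ((i+1 : Nat) : Int) (n : Int) (by push_cast; omega)
      (by push_cast; omega)]
  rw [List.filter_append, List.countP_append]
  have h1 : ((PySem.List.pyRange 1 ((i+1 : Nat) : Int) 1).filter p).countP
      (fun b => decide (b ≤ (i : Int)))
      = ((PySem.List.pyRange 1 ((i+1 : Nat) : Int) 1).filter p).length := by
    rw [List.countP_eq_length]
    intro b hb
    have := (PySem.List.mem_pyRange_one.mp (List.mem_filter.mp hb).1)
    simp only [decide_eq_true_eq]
    omega
  have h2 : ((PySem.List.pyRange ((i+1 : Nat) : Int) (n : Int) 1).filter p).countP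
      (fun b => decide (b ≤ (i : Int))) = 0 := by
    rw [List.countP_eq_zero]
    intro b hb
    have := (PySem.List.mem_pyRange_one.mp (List.mem_filter.mp hb).1)
    simp only [decide_eq_true_eq]
    omega
  omega

-- the change-point count is exactly A's propagated class value
theorem pv_clsP_eq (t : List Char) (order : List Int) (i : Nat) :
    pvClsP (pvPred t order) i = pvCls t order i := by
  induction i with
  | zero => rfl
  | succ k ih =>
    rw [show pvClsP (pvPred t order) (k+1)
          = pvClsP (pvPred t order) k + (if pvPred t order ((k+1 : Nat) : Int) then 1 else 0)
        from rfl, ih]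
    have e1 : PySem.List.pyGetD order ((k + 1 : Nat) : Int) 0 = pvO order (k+1) := by
      rw [PySem.List.pyGetD_natCast]; rfl
    have e2 : PySem.List.pyGetD order (((k + 1 : Nat) : Int) - 1) 0 = pvO order k := by
      rw [show ((k + 1 : Nat) : Int) - 1 = ((k : Nat) : Int) by push_cast; ring]
      rw [PySem.List.pyGetD_natCast]; rfl
    rw [show pvCls t order (k+1)
          = if pvCh t order (k+1) ≠ pvCh t order k
            then pvCls t order k + 1 else pvCls t order k from rfl]
    simp only [pvPred, e1, e2]
    by_cases hc : pvCh t order (k+1) = pvCh t order k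
    · simp [pvCh] at hc; simp [hc, pvCh]
    · simp [pvCh] at hc; simp [hc, pvCh]

theorem pv_B_eq_scat (text : String) (order : List Int) :
    ComputeClasses_alt text order = pvScat text.toList order text.toList.length := by
  simp only [ComputeClasses_alt]
  rw [show (fun i => decide (PySem.List.pyGetD text.toList (PySem.List.pyGetD order i 0) ' '
        ≠ PySem.List.pyGetD text.toList (PySem.List.pyGetD order (i - 1) 0) ' '))
      = pvPred text.toList order from rfl]
  rw [PySem.List.pyRange_zero_natCast, List.foldl_map]
  unfold pvScat
  apply PySem.List.foldl_congr_mem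
  intro cl k hk
  have hkn : k < text.toList.length := List.mem_range.mp hk
  have e1 : PySem.List.pyGetD order ((k : Nat) : Int) 0 = pvO order k := by
    rw [PySem.List.pyGetD_natCast]; rfl
  rw [e1]
  congr 1
  rw [pv_countLE_eq _ _ (pv_bnd_pairwise (pvPred text.toList order) text.toList.length)]
  rw [pv_count_full (pvPred text.toList order) text.toList.length k hkn]
  rw [pv_len_bnd (pvPred text.toList order) k]
  exact pv_clsP_eq text.toList order k

theorem pv_A_fold (text : String) (order : List Int)
    (hlen : text.toList.length ≤ order.length)
    (hin : ∀ i ∈ order.take text.toList.length, PySem.Raise.InRange text.toList.length i)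
    (j : Nat) (hj : j + 1 ≤ text.toList.length) :
    (PySem.List.pyRange 1 ((j+1 : Nat) : Int)).foldl
      (fun cl i =>
        if PySem.List.pyGetD text.toList (PySem.List.pyGetD order i 0) ' '
             ≠ PySem.List.pyGetD text.toList (PySem.List.pyGetD order (i - 1) 0) ' ' then
          PySem.List.pySetD cl (PySem.List.pyGetD order i 0)
            (PySem.List.pyGetD cl (PySem.List.pyGetD order (i - 1) 0) 0 + 1)
        else
          PySem.List.pySetD cl (PySem.List.pyGetD order i 0)
            (PySem.List.pyGetD cl (PySem.List.pyGetD order (i - 1) 0) 0))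
      (PySem.List.pySetD (List.replicate text.toList.length (0 : Int))
         (PySem.List.pyGetD order 0 0) 0)
    = pvScat text.toList order (j+1) := by
  have hordlen : ∀ k : Nat, k < text.toList.length → pvO order k ∈ order.take text.toList.length := by
    intro k hk
    have hk2 : k < order.length := by omega
    have : pvO order k = (order.take text.toList.length)[k]'(by simpa [hk2] using hk) := by
      simp [pvO, List.getElem_take, hk2]
    rw [this]
    exact List.getElem_mem _
  induction j with
  | zero =>
    have h0 : PySem.List.pyRange 1 ((1 : Nat) : Int) = [] := by decide
    rw [show (((0:Nat)+1 : Nat) : Int) = ((1 : Nat) : Int) by norm_num, h0]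
    simp only [List.foldl_nil]
    rw [pv_scat_succ text.toList order 0]
    have h00 : pvScat text.toList order 0 = List.replicate text.toList.length 0 := rfl
    rw [h00]
    simp [pvCls, pvO, PySem.List.pyGetD_zero]
  | succ j ih =>
    have hj1 : j + 1 ≤ text.toList.length := by omega
    have hcast : ((j + 1 + 1 : Nat) : Int) = ((j + 1 : Nat) : Int) + 1 := by push_cast; ring
    rw [hcast, PySem.List.pyRange_one_succ_right (by push_cast; omega), List.foldl_append,
      ih hj1]
    simp only [List.foldl_cons, List.foldl_nil]
    have e1 : PySem.List.pyGetD order ((j + 1 : Nat) : Int) 0 = pvO order (j+1) := by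
      rw [PySem.List.pyGetD_natCast]; rfl
    have e2 : PySem.List.pyGetD order (((j + 1 : Nat) : Int) - 1) 0 = pvO order j := by
      rw [show ((j + 1 : Nat) : Int) - 1 = ((j : Nat) : Int) by push_cast; ring]
      rw [PySem.List.pyGetD_natCast]; rfl
    have hread : PySem.List.pyGetD (pvScat text.toList order (j+1)) (pvO order j) 0
        = pvCls text.toList order j := by
      apply pv_scat_read
      exact hin _ (hordlen j (by omega))
    rw [e1, e2, hread, pv_scat_succ text.toList order (j+1)]
    rw [show pvCls text.toList order (j+1)
          = if PySem.List.pyGetD text.toList (pvO order (j+1)) ' '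
              ≠ PySem.List.pyGetD text.toList (pvO order j) ' '
            then pvCls text.toList order j + 1 else pvCls text.toList order j from rfl]
    split_ifs <;> rfl

-- ===== VERDICT (by name: the statement is the Claim_ definition above) =====
theorem ComputeClasses_spec : Claim_equal_ComputeClasses := by
  intro text order _ hpre
  obtain ⟨h1, h2, h3⟩ := hpre
  unfold Spec_ComputeClasses
  obtain ⟨n, hn⟩ : ∃ n, text.toList.length = n + 1 := ⟨text.toList.length - 1, by omega⟩
  rw [pv_B_eq_scat text order]
  simp only [ComputeClasses]
  rw [show ((text.toList.length : Int)) = (((n + 1 : Nat)) : Int) by rw [hn]]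
  rw [pv_A_fold text order h2 h3 n (by omega)]
  rw [hn]
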